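-- pv_equiv track=rewrite | github.com/tolkafkin/PerfomanceLab | task1/main.py | path_found
-- ===== SOURCE A (Python) =====
-- def path_found(n, m):
--     start_list = m*[num for num in range(1, n + 1)]
--     middle_list = []
--     end_list = []
--
--     finish = False
--     count = 0
--     while not finish:
--         for item in range(count, count + m):
--             middle_list.append(start_list[item])
--             count += 1
--
--         end_list.append(middle_list[0])
--         count -= 1
--
--         if middle_list[-1] == start_list[0]:
--             finish = True
--
--         middle_list.clear()
--     return "".join(map(str, end_list))
-- ===== SOURCE B (Python) =====
-- def path_found(n, m):
--     # One digit per walk step, computed by modular arithmetic; no m*n list.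
--     step = m - 1
--     digits = []
--     k = 0
--     while True:
--         digits.append(k * step % n + 1)
--         k += 1
--         if k * step % n == 0:
--             break
--     return "".join(map(str, digits))
-- ===== Notes on version B (the rewrite author's own statement) =====
-- stated objective: faster
-- what changed: B never materialises the m*n repeated list or the per-step m-element middle chunk: each emitted digit is computed directly by modular arithmetic as k*(m-1)%n+1, stopping when (k+1)*(m-1)%n==0, which is exactly the value A reads out of its repeated list.
import Mathlib
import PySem

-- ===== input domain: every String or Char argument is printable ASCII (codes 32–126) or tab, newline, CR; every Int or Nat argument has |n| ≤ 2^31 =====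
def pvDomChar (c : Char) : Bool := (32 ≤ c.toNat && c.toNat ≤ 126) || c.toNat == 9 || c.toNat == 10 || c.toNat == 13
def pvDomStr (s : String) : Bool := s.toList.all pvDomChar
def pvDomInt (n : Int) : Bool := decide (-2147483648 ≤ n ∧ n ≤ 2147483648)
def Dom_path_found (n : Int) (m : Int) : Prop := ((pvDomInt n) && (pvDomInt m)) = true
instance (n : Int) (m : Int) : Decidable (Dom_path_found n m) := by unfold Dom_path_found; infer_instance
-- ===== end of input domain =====

-- B replaces A's materialised m*n repeated list and per-step m-element chunk by direct
-- modular arithmetic per emitted digit (objective: faster; asymptotic).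


-- ===== PORT A =====
-- start_list = m*[num for num in range(1, n+1)]
def pfStart (n : Int) (m : Int) : List Int :=
  PySem.List.pyRepeat (PySem.List.pyRange 1 (n + 1) 1) m

-- the while-loop of A; fuel makes it total (under Pre_ the loop finishes within n
-- iterations, so the fuel branch is never taken there).
-- Out-of-range list reads (Python IndexError, outside Pre_) are modelled with default 0.
def pfLoopA (start : List Int) (m : Int) : Nat → Int → List Int → List Int
  | 0, _, endl => endl
  | f + 1, count, endl =>
    -- for item in range(count, count+m): middle_list.append(start_list[item]); count += 1
    let middle := (PySem.List.pyRange count (count + m) 1).foldl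
        (fun mid i => mid ++ [PySem.List.pyGetD start i 0]) []
    let count' := count + m - 1        -- count was advanced by m, then count -= 1
    let endl' := endl ++ [PySem.List.pyGetD middle 0 0]   -- end_list.append(middle_list[0])
    if PySem.List.pyGetD middle (-1) 0 = PySem.List.pyGetD start 0 0
      then endl'                        -- finish = True
      else pfLoopA start m f count' endl'

def path_found (n : Int) (m : Int) : String :=
  PySem.Str.join "" ((pfLoopA (pfStart n m) m n.toNat 0 []).map PySem.Int.toStr)

-- ===== PORT B =====
-- while True: digits.append(k*step % n + 1); k += 1; if k*step % n == 0: break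
def pfLoopB (n : Int) (step : Int) : Nat → Int → List Int → List Int
  | 0, _, digits => digits
  | f + 1, k, digits =>
    let digits' := digits ++ [PySem.Int.mod (k * step) n + 1]
    let k' := k + 1
    if PySem.Int.mod (k' * step) n = 0 then digits'
    else pfLoopB n step f k' digits'

def path_found_alt (n : Int) (m : Int) : String :=
  PySem.Str.join "" ((pfLoopB n (m - 1) n.toNat 0 []).map PySem.Int.toStr)

-- ===== PRECONDITION & SPEC =====
-- Pre_: exactly the inputs on which the Python A returns (n ≤ 0 or m ≤ 0 make A raise IndexError).
def Pre_path_found (n : Int) (m : Int) : Prop := 1 ≤ n ∧ 1 ≤ m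
instance (n : Int) (m : Int) : Decidable (Pre_path_found n m) := by unfold Pre_path_found; infer_instance
def pvWitness_path_found : Int × Int := (3, 2)

def Spec_path_found (n : Int) (m : Int) (out : String) : Prop := out = path_found_alt n m
instance (n : Int) (m : Int) (out : String) : Decidable (Spec_path_found n m out) := by unfold Spec_path_found; infer_instance

-- ===== CLAIM (what is proved, stated in full; the proofs are below) =====
def Claim_equal_path_found : Prop := ∀ (n : Int) (m : Int), Dom_path_found n m → Pre_path_found n m → Spec_path_found n m (path_found n m)

-- ===== LEMMAS AND PROOFS =====

-- indexing into the M-fold repetition of [1..n]: element i is i % n + 1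
lemma getFlatten (n : Int) (hn : 1 ≤ n) :
    ∀ (M : Nat) (i : Int), 0 ≤ i → i < (M : Int) * n →
      PySem.List.pyGetD ((List.replicate M (PySem.List.pyRange 1 (n + 1) 1)).flatten) i 0
        = i % n + 1 := by
  intro M
  induction M with
  | zero => intro i h0 hlt; simp at hlt; omega
  | succ M ih =>
    intro i h0 hlt
    have hbase : (PySem.List.pyRange 1 (n + 1) 1).length = n.toNat := by
      rw [PySem.List.length_pyRange_one]; omega
    have htl : ((List.replicate M (PySem.List.pyRange 1 (n + 1) 1)).flatten).length
        = M * n.toNat := by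
      simp [List.length_flatten, List.map_replicate, hbase]
    have hMn : ((M * n.toNat : Nat) : Int) = (M : Int) * n := by
      push_cast; rw [Int.toNat_of_nonneg (by omega)]
    have hlt' : i < (M : Int) * n + n := by
      have : ((M + 1 : Nat) : Int) * n = (M : Int) * n + n := by push_cast; ring
      omega
    rw [List.replicate_succ, List.flatten_cons]
    have hlenT : ((PySem.List.pyRange 1 (n + 1) 1) ++
        (List.replicate M (PySem.List.pyRange 1 (n + 1) 1)).flatten).length
        = n.toNat + M * n.toNat := by
      simp [hbase, htl]
    by_cases hcase : i < n
    · -- index lands in the first copy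
      rw [PySem.List.pyGetD_eq_getElem _ 0 h0 (by rw [hlenT]; omega)]
      rw [List.getElem_append_left (by rw [hbase]; omega)]
      rw [PySem.List.getElem_pyRange_one]
      have : i % n = i := Int.emod_eq_of_lt h0 hcase
      omega
    · -- index lands in a later copy: recurse at i - n
      have h0' : 0 ≤ i - n := by omega
      have hl' : i - n < (M : Int) * n := by omega
      have hrec := ih (i - n) h0' hl'
      rw [PySem.List.pyGetD_eq_getElem _ 0 h0' (by rw [htl]; omega)] at hrec
      rw [PySem.List.pyGetD_eq_getElem _ 0 h0 (by rw [hlenT]; omega)]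
      rw [List.getElem_append_right (by rw [hbase]; omega)]
      have hi : i.toNat - (PySem.List.pyRange 1 (n + 1) 1).length = (i - n).toNat := by
        rw [hbase]; omega
      simp only [hi]
      rw [hrec, Int.sub_emod_right]
lemma getStart (n m : Int) (hn : 1 ≤ n) (i : Int) (h0 : 0 ≤ i) (hlt : i < m * n) :
    PySem.List.pyGetD (pfStart n m) i 0 = i % n + 1 := by
  unfold pfStart PySem.List.pyRepeat
  have hm : 0 < m := by nlinarith
  apply getFlatten n hn m.toNat i h0
  have : ((m.toNat : Int)) * n = m * n := by rw [Int.toNat_of_nonneg (by omega)]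
  omega

-- the two loops produce the same list under the invariant count = k*(m-1)
lemma loop_eq (n m : Int) (hn : 1 ≤ n) (hm : 1 ≤ m) :
    ∀ (f : Nat) (k : Int) (acc : List Int), 0 ≤ k → k + (f : Int) = n →
      pfLoopA (pfStart n m) m f (k * (m - 1)) acc = pfLoopB n (m - 1) f k acc := by
  intro f
  induction f with
  | zero => intro k acc _ _; rfl
  | succ f ih =>
    intro k acc hk hkf
    have hkn : k ≤ n - 1 := by push_cast at hkf; omega
    set c : Int := k * (m - 1) with hc
    have hc0 : 0 ≤ c := mul_nonneg hk (by omega)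
    have hclt : c < m * n := by nlinarith
    have hc1lt : c + m - 1 < m * n := by nlinarith
    have hc10 : 0 ≤ c + m - 1 := by omega
    simp only [pfLoopA, pfLoopB,
      PySem.List.foldl_append_singleton_eq_map (fun i => PySem.List.pyGetD (pfStart n m) i 0),
      List.nil_append]
    set g : Int → Int := fun i => PySem.List.pyGetD (pfStart n m) i 0 with hg
    have hlenr : (PySem.List.pyRange c (c + m) 1).length = m.toNat := by
      rw [PySem.List.length_pyRange_one]; omega
    have hlenmid : ((PySem.List.pyRange c (c + m) 1).map g).length = m.toNat := by
      rw [List.length_map, hlenr]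
    -- middle[0] = g c
    have hmid0 : PySem.List.pyGetD ((PySem.List.pyRange c (c + m) 1).map g) 0 0 = g c := by
      rw [PySem.List.pyGetD_eq_getElem _ 0 le_rfl (by rw [hlenmid]; omega)]
      rw [List.getElem_map, PySem.List.getElem_pyRange_one]
      simp
    -- middle[-1] = g (c + m - 1)
    have hmidl : PySem.List.pyGetD ((PySem.List.pyRange c (c + m) 1).map g) (-1) 0
        = g (c + m - 1) := by
      rw [PySem.List.pyGetD_neg_ofNat _ 1 _ (by omega) (by rw [hlenmid]; omega)]
      rw [List.getElem_map, PySem.List.getElem_pyRange_one]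
      congr 1
      rw [hlenmid]
      have h1 : ((m.toNat - 1 : Nat) : Int) = m - 1 := by omega
      omega
    -- start[0] = 1
    have hstart0 : PySem.List.pyGetD (pfStart n m) 0 0 = 1 := by
      rw [getStart n m hn 0 le_rfl (by nlinarith), Int.zero_emod]
      rfl
    have hgc : g c = c % n + 1 := getStart n m hn c hc0 hclt
    have hgl : g (c + m - 1) = (c + m - 1) % n + 1 := getStart n m hn _ hc10 hc1lt
    have harg1 : (k + 1) * (m - 1) = c + m - 1 := by rw [hc]; ring
    rw [hmid0, hmidl, hstart0, hgc, hgl,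
      PySem.Int.mod_eq_emod_of_pos (show (0:Int) < n by omega),
      PySem.Int.mod_eq_emod_of_pos (show (0:Int) < n by omega), harg1, ← hc]
    by_cases hfin : (c + m - 1) % n = 0
    · rw [if_pos (by omega), if_pos hfin]
    · rw [if_neg (by omega), if_neg hfin]
      rw [show c + m - 1 = (k + 1) * (m - 1) from harg1.symm]
      exact ih (k + 1) _ (by omega) (by push_cast at hkf ⊢; omega)

-- ===== VERDICT (by name: the statement is the Claim_ definition above) =====
theorem path_found_spec : Claim_equal_path_found := by
  intro n m _ hpre
  obtain ⟨hn, hm⟩ := hpre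
  unfold Spec_path_found path_found path_found_alt
  have h := loop_eq n m hn hm n.toNat 0 [] le_rfl (by omega)
  rw [zero_mul] at h
  rw [h]
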